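-- pv_equiv track=rewrite | github.com/tat-tik/Test_homework | main.py | supernames
-- ===== SOURCE A (Python) =====
-- def supernames(mentors, courses):
--     mentors_names = []
--     for m in mentors:
--         course_names = []
--         for name in m:
--             name_split = name.split()
--             only_name = name_split[:-1]
--             course_names += only_name
--         mentors_names.append(course_names)
--     pairs = []
--     for id1 in range(len(mentors_names)):
--         for id2 in range(len(mentors_names)):
--             if id1 == id2:
--                 continue
--             intersection_set = set(mentors_names[id1]) & set(mentors_names[id2])
--             if len(intersection_set) > 0:
--                 pair = {courses[id1], courses[id2]}
--                 if pair not in pairs: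
--                     pairs.append(pair)
--                     all_names_sorted = sorted(intersection_set)
--                     return f"На курсах '{courses[id1]}' и '{courses[id2]}' преподают: {', '.join(all_names_sorted)}"
-- ===== SOURCE B (Python) =====
-- def supernames(mentors, courses):
--     # token sets per mentor (each teacher name minus its last word), computed once
--     toks = [set(t for name in m for t in name.split()[:-1]) for m in mentors]
--     # inverted index: token -> ascending list of mentor ids carrying it
--     occ = [(t, i) for i, s in enumerate(toks) for t in s]
--     index = {}
--     for t, i in occ:
--         index.setdefault(t, []).append(i)
--     # the winning pair of A's scan is the lexicographically smallest (id1, id2)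
--     # among sharing pairs, i.e. the least (ids[0], ids[1]) over index entries
--     best = None
--     for ids in index.values():
--         if len(ids) >= 2:
--             p = (ids[0], ids[1])
--             if best is None or p < best:
--                 best = p
--     if best is None:
--         return None
--     id1, id2 = best
--     shared = sorted(toks[id1] & toks[id2])
--     return f"На курсах '{courses[id1]}' и '{courses[id2]}' преподают: {', '.join(shared)}"
-- ===== Notes on version B (the rewrite author's own statement) =====
-- stated objective: faster
-- what changed: A rebuilds two token sets and intersects them for every ordered mentor pair; B computes each mentor's token set once, builds an inverted index token->ascending mentor ids in one pass, and takes the lexicographically least (ids[0], ids[1]) over the index entries, which equals A's first-hit pair.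
-- outside the precondition, e.g. on supernames([['a b']], []): A returns None, B returns None
import Mathlib
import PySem

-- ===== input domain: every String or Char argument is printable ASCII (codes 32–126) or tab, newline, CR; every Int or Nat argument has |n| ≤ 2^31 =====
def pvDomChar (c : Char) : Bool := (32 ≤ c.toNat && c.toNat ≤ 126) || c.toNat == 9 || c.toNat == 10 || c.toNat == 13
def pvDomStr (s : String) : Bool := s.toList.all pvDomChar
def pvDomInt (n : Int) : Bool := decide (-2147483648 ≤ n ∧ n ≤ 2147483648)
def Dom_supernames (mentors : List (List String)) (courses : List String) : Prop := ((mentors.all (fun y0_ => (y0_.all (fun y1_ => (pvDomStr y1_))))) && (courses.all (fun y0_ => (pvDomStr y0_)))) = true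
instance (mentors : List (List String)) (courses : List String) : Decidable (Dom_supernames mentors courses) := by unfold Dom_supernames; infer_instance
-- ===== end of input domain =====

-- B replaces A's all-pairs set-intersection scan by an inverted index token→mentor-ids
-- built in one pass, picking the least (id1,id2); return value only, no mutation.

-- ===== PORT A =====
-- inner loop 'for id2 in range(len(mentors_names))' with early return; pairs is threaded
-- unchanged (Python appends to it only immediately before returning)
def supernamesInner (mn : List (List String)) (courses : List String)
    (pairs : List (PySem.Set String)) (id1 : Int) : List Int → Option String
  | [] => none
  | id2 :: rest =>
    if id1 == id2 then supernamesInner mn courses pairs id1 rest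
    else
      let interSet : PySem.Set String :=
        PySem.Set.inter (PySem.Set.ofList (PySem.List.pyGetD mn id1 []))
          (PySem.Set.ofList (PySem.List.pyGetD mn id2 []))
      if 0 < PySem.Set.len interSet then
        match PySem.List.pyGet? courses id1, PySem.List.pyGet? courses id2 with
        | some c1, some c2 =>
          let pair : PySem.Set String := PySem.Set.ofList [c1, c2]
          if pairs.contains pair then supernamesInner mn courses pairs id1 rest
          else
            some ("На курсах '" ++ c1 ++ "' и '" ++ c2 ++ "' преподают: " ++
              PySem.Str.join ", " (PySem.List.sorted interSet (fun x => x)))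
        | _, _ => none  -- IndexError on courses[idx]; excluded by Pre_
      else supernamesInner mn courses pairs id1 rest

-- outer loop 'for id1 in range(len(mentors_names))'
def supernamesOuter (mn : List (List String)) (courses : List String)
    (pairs : List (PySem.Set String)) : List Int → Option String
  | [] => none
  | id1 :: rest =>
    match supernamesInner mn courses pairs id1 (PySem.List.pyRange 0 mn.length) with
    | some r => some r
    | none => supernamesOuter mn courses pairs rest

def supernames (mentors : List (List String)) (courses : List String) : Option String :=
  let mn : List (List String) := mentors.map (fun m =>
    m.foldl (fun acc name => acc ++ PySem.List.slice (PySem.Str.split₀ name) none (some (-1))) [])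
  supernamesOuter mn courses [] (PySem.List.pyRange 0 mn.length)

-- ===== PORT B =====
def supernames_alt (mentors : List (List String)) (courses : List String) : Option String :=
  let toks : List (PySem.Set String) := mentors.map (fun m =>
    PySem.Set.ofList (m.flatMap (fun name => PySem.List.slice (PySem.Str.split₀ name) none (some (-1)))))
  let occ : List (String × Int) :=
    (PySem.List.enumerate toks).flatMap (fun p => p.2.map (fun t => (t, p.1)))
  let index : PySem.Dict String (List Int) :=
    occ.foldl (fun d p => d.modify p.1 [] (fun l => l ++ [p.2])) PySem.Dict.empty
  let best : Option (Int × Int) := index.values.foldl (fun best ids =>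
    if 2 ≤ ids.length then
      let p : Int × Int := (PySem.List.pyGetD ids 0 0, PySem.List.pyGetD ids 1 0)
      match best with
      | none => some p
      | some b => if p.1 < b.1 || (p.1 == b.1 && p.2 < b.2) then some p else some b
    else best) none
  match best with
  | none => none
  | some (id1, id2) =>
    let shared : List String :=
      PySem.List.sorted (PySem.Set.inter (PySem.List.pyGetD toks id1 [])
        (PySem.List.pyGetD toks id2 [])) (fun x => x)
    match PySem.List.pyGet? courses id1, PySem.List.pyGet? courses id2 with
    | some c1, some c2 =>
      some ("На курсах '" ++ c1 ++ "' и '" ++ c2 ++ "' преподают: " ++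
        PySem.Str.join ", " shared)
    | _, _ => none  -- IndexError on courses[idx]; excluded by Pre_

-- ===== PRECONDITION & SPEC =====
-- A indexes courses[id] for mentor indices id, raising IndexError when courses is shorter
-- than mentors; Pre_ requires the natural parallel-list shape (it also excludes some
-- short-courses inputs where no pair exists and A happens to return None).
def Pre_supernames (mentors : List (List String)) (courses : List String) : Prop :=
  mentors.length ≤ courses.length
instance (mentors : List (List String)) (courses : List String) : Decidable (Pre_supernames mentors courses) := by unfold Pre_supernames; infer_instance

def pvWitness_supernames : List (List String) × List String :=
  ([["Anna Petrova X", "Ivan Y"], ["Anna Petrova Z"]], ["Python", "Java"])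

def Spec_supernames (mentors : List (List String)) (courses : List String) (out : Option String) : Prop := out = supernames_alt mentors courses
instance (mentors : List (List String)) (courses : List String) (out : Option String) : Decidable (Spec_supernames mentors courses out) := by unfold Spec_supernames; infer_instance

-- ===== CLAIM (what is proved, stated in full; the proofs are below) =====
def Claim_equal_supernames : Prop := ∀ (mentors : List (List String)) (courses : List String), Dom_supernames mentors courses → Pre_supernames mentors courses → Spec_supernames mentors courses (supernames mentors courses)


-- ===== LEMMAS AND PROOFS =====

-- tokens of one mentor / token sets of all mentors (the value both ports compute)
def pvTok (m : List String) : List String :=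
  m.flatMap (fun name => PySem.List.slice (PySem.Str.split₀ name) none (some (-1)))

def pvToks (mentors : List (List String)) : List (PySem.Set String) :=
  mentors.map (fun m => PySem.Set.ofList (pvTok m))

-- the loop conditions of A, abstracted
def pvShares (toks : List (PySem.Set String)) (i j : Int) : Bool :=
  decide (0 < PySem.Set.len (PySem.Set.inter (PySem.List.pyGetD toks i []) (PySem.List.pyGetD toks j [])))

def pvHitP (toks : List (PySem.Set String)) (i j : Int) : Bool :=
  !(i == j) && pvShares toks i j

def pvFmt (toks : List (PySem.Set String)) (courses : List String) (i j : Int) : String :=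
  "На курсах '" ++ PySem.List.pyGetD courses i "" ++ "' и '" ++ PySem.List.pyGetD courses j "" ++
    "' преподают: " ++ PySem.Str.join ", "
      (PySem.List.sorted (PySem.Set.inter (PySem.List.pyGetD toks i []) (PySem.List.pyGetD toks j []))
        (fun x => x))

-- the pair A's double scan stops at
def pvHit (toks : List (PySem.Set String)) (O F : List Int) : Option (Int × Int) :=
  O.findSome? (fun i => (F.find? (fun j => pvHitP toks i j)).map (fun j => (i, j)))

-- lexicographic order on pairs (Python tuple <)
def pvLt (p b : Int × Int) : Bool := p.1 < b.1 || (p.1 == b.1 && p.2 < b.2)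

def pvLeP (x y : Int × Int) : Prop := x.1 < y.1 ∨ (x.1 = y.1 ∧ x.2 ≤ y.2)

def pvMinStep (acc : Option (Int × Int)) (p : Int × Int) : Option (Int × Int) :=
  match acc with
  | none => some p
  | some b => if pvLt p b then some p else some b

def pvMin? (l : List (Int × Int)) : Option (Int × Int) := l.foldl pvMinStep none

-- B's occurrence list, id lists, and candidate pairs
def pvOcc (toks : List (PySem.Set String)) : List (String × Int) :=
  (PySem.List.enumerate toks).flatMap (fun p => p.2.map (fun t => (t, p.1)))

def pvIds (toks : List (PySem.Set String)) (t : String) : List Int :=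
  ((pvOcc toks).filter (fun p => p.1 == t)).map (fun p => p.2)

def pvIdsSpec (toks : List (PySem.Set String)) (t : String) (m : Nat) : List Int :=
  match toks with
  | [] => []
  | s :: rest => (if t ∈ s then [(m : Int)] else []) ++ pvIdsSpec rest t (m + 1)

def pvCands (toks : List (PySem.Set String)) : List (Int × Int) :=
  ((PySem.Set.ofList ((pvOcc toks).map (fun p => p.1))).map (fun t => pvIds toks t)).filterMap
    (fun ids => if 2 ≤ ids.length then
        some (PySem.List.pyGetD ids 0 0, PySem.List.pyGetD ids 1 0)
      else none)

-- basic facts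
lemma pvGetSome {α : Type} (xs : List α) (i : Int) (d : α) (h0 : 0 ≤ i) (h1 : i < xs.length) :
    PySem.List.pyGet? xs i = some (PySem.List.pyGetD xs i d) := by
  obtain ⟨n, rfl⟩ := Int.eq_ofNat_of_zero_le h0
  have h1' : n < xs.length := by exact_mod_cast h1
  simp [PySem.List.pyGet?_natCast, PySem.List.pyGetD_natCast, List.getD_eq_getElem?_getD,
    List.getElem?_eq_getElem h1']

lemma pvSharesIff (toks : List (PySem.Set String)) (i j : Int) :
    pvShares toks i j = true ↔
      ∃ t, t ∈ PySem.List.pyGetD toks i [] ∧ t ∈ PySem.List.pyGetD toks j [] := by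
  unfold pvShares
  rw [decide_eq_true_iff]
  have hlen : PySem.Set.len (PySem.Set.inter (PySem.List.pyGetD toks i [])
      (PySem.List.pyGetD toks j [])) =
      ((PySem.Set.inter (PySem.List.pyGetD toks i []) (PySem.List.pyGetD toks j [])).length : Int) := rfl
  rw [hlen]
  constructor
  · intro h
    have hpos : 0 < (PySem.Set.inter (PySem.List.pyGetD toks i [])
        (PySem.List.pyGetD toks j [])).length := by omega
    obtain ⟨t, ht⟩ := List.exists_mem_of_ne_nil
      (PySem.Set.inter (PySem.List.pyGetD toks i []) (PySem.List.pyGetD toks j []))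
      (List.ne_nil_of_length_pos hpos)
    exact ⟨t, (PySem.Set.mem_inter _ _ t).mp ht⟩
  · rintro ⟨t, ht1, ht2⟩
    have : t ∈ PySem.Set.inter (PySem.List.pyGetD toks i []) (PySem.List.pyGetD toks j []) :=
      (PySem.Set.mem_inter _ _ t).mpr ⟨ht1, ht2⟩
    have := List.length_pos_of_mem this
    omega

-- ---- A-side characterisation ----
lemma pvInnerChar (mn : List (List String)) (courses : List String) (id1 : Int) (F : List Int)
    (hid1 : 0 ≤ id1 ∧ id1 < (courses.length : Int))
    (hF : ∀ j ∈ F, 0 ≤ j ∧ j < (courses.length : Int)) :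
    supernamesInner mn courses [] id1 F =
      (F.find? (fun j => pvHitP (mn.map PySem.Set.ofList) id1 j)).map
        (fun j => pvFmt (mn.map PySem.Set.ofList) courses id1 j) := by
  induction F with
  | nil => rfl
  | cons j rest ih =>
    have hj := hF j (by simp)
    have hrest : ∀ j' ∈ rest, 0 ≤ j' ∧ j' < (courses.length : Int) :=
      fun j' hj' => hF j' (List.mem_cons_of_mem _ hj')
    have e1 : PySem.Set.ofList (PySem.List.pyGetD mn id1 []) =
        PySem.List.pyGetD (mn.map PySem.Set.ofList) id1 [] :=
      (PySem.List.pyGetD_map PySem.Set.ofList mn id1 []).symm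
    have e2 : PySem.Set.ofList (PySem.List.pyGetD mn j []) =
        PySem.List.pyGetD (mn.map PySem.Set.ofList) j [] :=
      (PySem.List.pyGetD_map PySem.Set.ofList mn j []).symm
    by_cases hij : id1 = j
    · have hhp : pvHitP (mn.map PySem.Set.ofList) id1 j = false := by
        simp [pvHitP, hij]
      rw [List.find?_cons_of_neg (by simp [hhp]), ← ih hrest]
      simp only [supernamesInner]
      rw [if_pos (by simp [hij])]
    · by_cases hsh : pvShares (mn.map PySem.Set.ofList) id1 j = true
      · have hhp : pvHitP (mn.map PySem.Set.ofList) id1 j = true := by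
          simp [pvHitP, hij, hsh]
        rw [List.find?_cons_of_pos hhp]
        simp only [supernamesInner]
        rw [if_neg (by simp [hij])]
        have hcond : 0 < PySem.Set.len (PySem.Set.inter
            (PySem.Set.ofList (PySem.List.pyGetD mn id1 []))
            (PySem.Set.ofList (PySem.List.pyGetD mn j []))) := by
          rw [e1, e2]
          exact of_decide_eq_true hsh
        rw [if_pos hcond]
        simp only [pvGetSome courses id1 "" hid1.1 hid1.2, pvGetSome courses j "" hj.1 hj.2]
        rw [if_neg (by simp : ¬ (([] : List (PySem.Set String)).contains
          (PySem.Set.ofList [PySem.List.pyGetD courses id1 "", PySem.List.pyGetD courses j ""]) = true))]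
        simp only [Option.map_some]
        unfold pvFmt
        rw [e1, e2]
      · have hhp : pvHitP (mn.map PySem.Set.ofList) id1 j = false := by
          simp [pvHitP, hij]
          simpa using hsh
        rw [List.find?_cons_of_neg (by simp [hhp]), ← ih hrest]
        simp only [supernamesInner]
        rw [if_neg (by simp [hij])]
        have hcond : ¬ 0 < PySem.Set.len (PySem.Set.inter
            (PySem.Set.ofList (PySem.List.pyGetD mn id1 []))
            (PySem.Set.ofList (PySem.List.pyGetD mn j []))) := by
          rw [e1, e2]
          exact fun h => absurd (decide_eq_true h) hsh
        rw [if_neg hcond]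

lemma pvOuterChar (mn : List (List String)) (courses : List String) (O : List Int)
    (hcov : (mn.length : Int) ≤ (courses.length : Int))
    (hO : ∀ i ∈ O, 0 ≤ i ∧ i < (mn.length : Int)) :
    supernamesOuter mn courses [] O =
      (pvHit (mn.map PySem.Set.ofList) O (PySem.List.pyRange 0 mn.length)).map
        (fun p => pvFmt (mn.map PySem.Set.ofList) courses p.1 p.2) := by
  induction O with
  | nil => rfl
  | cons i rest ih =>
    have hi := hO i (by simp)
    have hrest : ∀ i' ∈ rest, 0 ≤ i' ∧ i' < (mn.length : Int) :=
      fun i' hi' => hO i' (List.mem_cons_of_mem _ hi')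
    have hF : ∀ j ∈ PySem.List.pyRange 0 (mn.length : Int),
        0 ≤ j ∧ j < (courses.length : Int) := by
      intro j hj
      rw [PySem.List.mem_pyRange_one] at hj
      exact ⟨hj.1, lt_of_lt_of_le hj.2 hcov⟩
    simp only [supernamesOuter]
    rw [pvInnerChar mn courses i (PySem.List.pyRange 0 (mn.length : Int))
      ⟨hi.1, lt_of_lt_of_le hi.2 hcov⟩ hF]
    cases hfind : (PySem.List.pyRange 0 (mn.length : Int)).find?
        (fun j => pvHitP (mn.map PySem.Set.ofList) i j) with
    | some j => simp [pvHit, List.findSome?_cons, hfind]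
    | none =>
      simp only [Option.map_none]
      rw [ih hrest]
      simp [pvHit, List.findSome?_cons, hfind]

lemma pvAChar (mentors : List (List String)) (courses : List String)
    (hcov : mentors.length ≤ courses.length) :
    supernames mentors courses =
      (pvHit (pvToks mentors) (PySem.List.pyRange 0 mentors.length)
        (PySem.List.pyRange 0 mentors.length)).map
        (fun p => pvFmt (pvToks mentors) courses p.1 p.2) := by
  simp only [supernames]
  have hlen : (List.map (fun m => List.foldl (fun acc name =>
      acc ++ PySem.List.slice (PySem.Str.split₀ name) none (some (-1))) [] m) mentors).length =
      mentors.length := List.length_map ..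
  have hmap : (List.map (fun m => List.foldl (fun acc name =>
      acc ++ PySem.List.slice (PySem.Str.split₀ name) none (some (-1))) [] m) mentors).map
      PySem.Set.ofList = pvToks mentors := by
    rw [List.map_map]
    apply List.map_congr_left
    intro m _
    simp only [Function.comp_apply, pvToks]
    rw [PySem.List.foldl_append_eq_flatMap]
    rfl
  rw [pvOuterChar _ courses _ (by rw [hlen]; exact_mod_cast hcov)
    (by intro i hi; rwa [PySem.List.mem_pyRange_one] at hi), hmap, hlen]

-- ---- order facts ----
lemma pvLt_false_iff (p b : Int × Int) : pvLt p b = false ↔ pvLeP b p := by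
  obtain ⟨p1, p2⟩ := p; obtain ⟨b1, b2⟩ := b
  simp [pvLt, pvLeP]
  omega

lemma pvLeP_trans {x y z : Int × Int} (h1 : pvLeP x y) (h2 : pvLeP y z) : pvLeP x z := by
  simp only [pvLeP] at *
  omega

lemma pvLeP_antisymm {x y : Int × Int} (h1 : pvLeP x y) (h2 : pvLeP y x) : x = y := by
  obtain ⟨x1, x2⟩ := x; obtain ⟨y1, y2⟩ := y
  simp only [pvLeP, Prod.mk.injEq] at *
  omega

-- ---- min-fold characterisation ----
lemma pvLeP_refl (x : Int × Int) : pvLeP x x := by simp [pvLeP]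

lemma pvLt_true_le {p b : Int × Int} (h : pvLt p b = true) : pvLeP p b := by
  obtain ⟨p1, p2⟩ := p; obtain ⟨b1, b2⟩ := b
  simp [pvLt, pvLeP] at *
  omega

lemma pvMinFoldAcc (l : List (Int × Int)) (b : Int × Int) :
    ∃ m, List.foldl pvMinStep (some b) l = some m ∧ (m = b ∨ m ∈ l) ∧
      pvLeP m b ∧ ∀ p ∈ l, pvLeP m p := by
  induction l generalizing b with
  | nil => exact ⟨b, rfl, Or.inl rfl, pvLeP_refl b, by simp⟩
  | cons p l ih =>
    by_cases hlt : pvLt p b = true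
    · obtain ⟨m, hm, hmem, hle, hall⟩ := ih p
      refine ⟨m, ?_, ?_, ?_, ?_⟩
      · simpa [List.foldl_cons, pvMinStep, hlt] using hm
      · rcases hmem with h | h
        · exact Or.inr (by simp [h])
        · exact Or.inr (by simp [h])
      · exact pvLeP_trans hle (pvLt_true_le hlt)
      · intro q hq
        rcases List.mem_cons.mp hq with rfl | hq'
        · exact hle
        · exact hall q hq'
    · obtain ⟨m, hm, hmem, hle, hall⟩ := ih b
      have hbp : pvLeP b p := (pvLt_false_iff p b).mp (by simpa using hlt)
      refine ⟨m, ?_, ?_, hle, ?_⟩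
      · simpa [List.foldl_cons, pvMinStep, hlt] using hm
      · rcases hmem with h | h
        · exact Or.inl h
        · exact Or.inr (by simp [h])
      · intro q hq
        rcases List.mem_cons.mp hq with rfl | hq'
        · exact pvLeP_trans hle hbp
        · exact hall q hq'

lemma pvMin?_none_iff (l : List (Int × Int)) : pvMin? l = none ↔ l = [] := by
  cases l with
  | nil => simp [pvMin?]
  | cons p l =>
    obtain ⟨m, hm, _, _, _⟩ := pvMinFoldAcc l p
    simp only [pvMin?, List.foldl_cons]
    have : pvMinStep none p = some p := rfl
    rw [this, hm]
    simp

lemma pvMin?_some (l : List (Int × Int)) (m : Int × Int) (hm : pvMin? l = some m) :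
    m ∈ l ∧ ∀ p ∈ l, pvLeP m p := by
  cases l with
  | nil => simp [pvMin?] at hm
  | cons p l =>
    obtain ⟨m', hm', hmem, hle, hall⟩ := pvMinFoldAcc l p
    simp only [pvMin?, List.foldl_cons] at hm
    have hstep : pvMinStep none p = some p := rfl
    rw [hstep, hm'] at hm
    obtain rfl : m' = m := by simpa using hm
    constructor
    · rcases hmem with h | h
      · simp [h]
      · exact List.mem_cons_of_mem _ h
    · intro q hq
      rcases List.mem_cons.mp hq with rfl | hq'
      · exact hle
      · exact hall q hq'

-- ---- first-hit characterisation ----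
lemma pvFindFirst (F : List Int) (p : Int → Bool) (j : Int) (hs : F.Pairwise (· < ·))
    (h : F.find? p = some j) : p j = true ∧ j ∈ F ∧ ∀ j' ∈ F, p j' = true → j ≤ j' := by
  induction F with
  | nil => simp at h
  | cons a rest ih =>
    rw [List.pairwise_cons] at hs
    by_cases ha : p a = true
    · rw [List.find?_cons_of_pos ha] at h
      obtain rfl : a = j := by simpa using h
      refine ⟨ha, by simp, ?_⟩
      intro j' hj' _
      rcases List.mem_cons.mp hj' with rfl | hj''
      · exact le_refl _
      · exact le_of_lt (hs.1 j' hj'')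
    · rw [List.find?_cons_of_neg (by simpa using ha)] at h
      obtain ⟨hpj, hjmem, hall⟩ := ih hs.2 h
      refine ⟨hpj, List.mem_cons_of_mem _ hjmem, ?_⟩
      intro j' hj' hpj'
      rcases List.mem_cons.mp hj' with rfl | hj''
      · exact absurd hpj' ha
      · exact hall j' hj'' hpj'

lemma pvHit_none_iff (toks : List (PySem.Set String)) (O F : List Int) :
    pvHit toks O F = none ↔ ∀ i ∈ O, ∀ j ∈ F, pvHitP toks i j = false := by
  simp [pvHit, List.findSome?_eq_none_iff, List.find?_eq_none]

lemma pvHit_some (toks : List (PySem.Set String)) (O F : List Int) (h : Int × Int)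
    (hO : O.Pairwise (· < ·)) (hF : F.Pairwise (· < ·)) (hh : pvHit toks O F = some h) :
    pvHitP toks h.1 h.2 = true ∧ h.1 ∈ O ∧ h.2 ∈ F ∧
      ∀ i ∈ O, ∀ j ∈ F, pvHitP toks i j = true → pvLeP h (i, j) := by
  induction O with
  | nil => simp [pvHit] at hh
  | cons i0 rest ih =>
    rw [List.pairwise_cons] at hO
    cases hfind : F.find? (fun j => pvHitP toks i0 j) with
    | some j =>
      obtain rfl : (i0, j) = h := by
        simpa [pvHit, List.findSome?_cons, hfind] using hh
      obtain ⟨hp, hjF, hfirst⟩ := pvFindFirst F _ j hF hfind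
      refine ⟨hp, by simp, hjF, ?_⟩
      intro i hi j' hj' hij'
      rcases List.mem_cons.mp hi with rfl | hi'
      · exact Or.inr ⟨rfl, hfirst j' hj' hij'⟩
      · exact Or.inl (hO.1 i hi')
    | none =>
      have hh' : pvHit toks rest F = some h := by
        simpa [pvHit, List.findSome?_cons, hfind] using hh
      obtain ⟨hp, hmem, hjF, hall⟩ := ih hO.2 hh'
      refine ⟨hp, List.mem_cons_of_mem _ hmem, hjF, ?_⟩
      intro i hi j' hj' hij'
      rcases List.mem_cons.mp hi with rfl | hi'
      · exact absurd hij' (by simpa using (List.find?_eq_none.mp hfind) j' hj')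
      · exact hall i hi' j' hj' hij'

-- ---- the id lists of the inverted index ----
lemma pvIdsAux (toks : List (PySem.Set String)) (t : String) (m : Nat)
    (htn : ∀ s ∈ toks, s.Nodup) :
    (((PySem.List.enumerate toks (m : Int)).flatMap (fun p => p.2.map (fun u => (u, p.1)))).filter
        (fun p => p.1 == t)).map (fun p => p.2) = pvIdsSpec toks t m := by
  induction toks generalizing m with
  | nil => rfl
  | cons s rest ih =>
    have henum : PySem.List.enumerate (s :: rest) (m : Int) =
        ((m : Int), s) :: PySem.List.enumerate rest ((m : Int) + 1) := rfl
    have hcast : ((m : Int) + 1) = ((m + 1 : Nat) : Int) := by push_cast; ring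
    rw [henum, List.flatMap_cons, List.filter_append, List.map_append, hcast,
      ih (m + 1) (fun u hu => htn u (List.mem_cons_of_mem _ hu))]
    congr 1
    have hfm : (s.map (fun u => (u, (m : Int)))).filter (fun p => p.1 == t) =
        (s.filter (fun u => u == t)).map (fun u => (u, (m : Int))) := by
      rw [List.filter_map]
      rfl
    rw [hfm, List.filter_beq]
    have hnd : s.Nodup := htn s (by simp)
    by_cases hts : t ∈ s
    · have : List.count t s = 1 := List.count_eq_one_of_mem hnd hts
      simp [this, pvIdsSpec, hts]
    · have : List.count t s = 0 := List.count_eq_zero.mpr hts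
      simp [this, pvIdsSpec, hts]

lemma pvIds_eq_spec (toks : List (PySem.Set String)) (t : String) (htn : ∀ s ∈ toks, s.Nodup) :
    pvIds toks t = pvIdsSpec toks t 0 := by
  have := pvIdsAux toks t 0 htn
  simpa [pvIds, pvOcc] using this

lemma pvIdsSpec_mem (toks : List (PySem.Set String)) (t : String) (m : Nat) (j : Int) :
    j ∈ pvIdsSpec toks t m ↔
      ∃ k, k < toks.length ∧ t ∈ toks.getD k [] ∧ j = ((m + k : Nat) : Int) := by
  induction toks generalizing m with
  | nil => simp [pvIdsSpec]
  | cons s rest ih =>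
    simp only [pvIdsSpec, List.mem_append, ih (m + 1)]
    constructor
    · rintro (hj | ⟨k, hk, hmem, rfl⟩)
      · refine ⟨0, by simp, ?_, ?_⟩
        · simpa using (by split at hj <;> simp_all : t ∈ s)
        · have : j = (m : Int) := by split at hj <;> simp_all
          simp [this]
      · exact ⟨k + 1, by simpa using hk, by simpa using hmem, by push_cast; ring⟩
    · rintro ⟨k, hk, hmem, rfl⟩
      cases k with
      | zero =>
        left
        simp only [List.getD_cons_zero] at hmem
        simp [hmem]
      | succ k' =>
        right
        refine ⟨k', by simpa using hk, by simpa using hmem, by push_cast; ring⟩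

lemma pvIdsSpec_lb (toks : List (PySem.Set String)) (t : String) (m : Nat) (j : Int)
    (hj : j ∈ pvIdsSpec toks t m) : (m : Int) ≤ j := by
  obtain ⟨k, _, _, rfl⟩ := (pvIdsSpec_mem toks t m j).mp hj
  push_cast
  omega

lemma pvIdsSpec_sorted (toks : List (PySem.Set String)) (t : String) (m : Nat) :
    (pvIdsSpec toks t m).Pairwise (· < ·) := by
  induction toks generalizing m with
  | nil => simp [pvIdsSpec]
  | cons s rest ih =>
    simp only [pvIdsSpec]
    rw [List.pairwise_append]
    refine ⟨?_, ih (m + 1), ?_⟩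
    · split <;> simp
    · intro a ha b hb
      have hb' := pvIdsSpec_lb rest t (m + 1) b hb
      have ha' : a = (m : Int) := by split at ha <;> simp_all
      push_cast at hb'
      omega

-- two distinct members of a strictly increasing list dominate its first two entries
lemma pvSortedPairDom (l : List Int) (a b : Int) (hs : l.Pairwise (· < ·))
    (ha : a ∈ l) (hb : b ∈ l) (hab : a ≠ b) :
    2 ≤ l.length ∧ pvLeP (PySem.List.pyGetD l 0 0, PySem.List.pyGetD l 1 0) (a, b) := by
  match l with
  | [] => simp at ha
  | [x] =>
    simp at ha hb
    exact absurd (ha.trans hb.symm) hab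
  | x :: y :: r =>
    rw [List.pairwise_cons, List.pairwise_cons] at hs
    have hg0 : PySem.List.pyGetD (x :: y :: r) 0 0 = x := by simp [PySem.List.pyGetD_ofNat']
    have hg1 : PySem.List.pyGetD (x :: y :: r) 1 0 = y := by simp [PySem.List.pyGetD_ofNat']
    refine ⟨by simp, ?_⟩
    rw [hg0, hg1]
    have hxy : x < y := hs.1 y (by simp)
    rcases List.mem_cons.mp ha with rfl | ha'
    · -- a = x : then b ∈ y :: r, so y ≤ b
      have hb' : b ∈ y :: r := by
        rcases List.mem_cons.mp hb with rfl | h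
        · exact absurd rfl hab
        · exact h
      have : y ≤ b := by
        rcases List.mem_cons.mp hb' with rfl | h
        · exact le_refl _
        · exact le_of_lt (hs.2.1 b h)
      exact Or.inr ⟨rfl, this⟩
    · exact Or.inl (hs.1 a ha')

-- ---- candidate-list facts ----
lemma pvCands_mem (toks : List (PySem.Set String)) (c : Int × Int)
    (htn : ∀ s ∈ toks, s.Nodup) (hc : c ∈ pvCands toks) :
    pvHitP toks c.1 c.2 = true ∧ c.1 ∈ PySem.List.pyRange 0 toks.length ∧
      c.2 ∈ PySem.List.pyRange 0 toks.length := by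
  unfold pvCands at hc
  obtain ⟨ids, hids, hg⟩ := List.mem_filterMap.mp hc
  obtain ⟨t, _, rfl⟩ := List.mem_map.mp hids
  rw [pvIds_eq_spec toks t htn] at hg
  by_cases hlen : 2 ≤ (pvIdsSpec toks t 0).length
  swap
  · simp [hlen] at hg
  rw [if_pos hlen] at hg
  obtain rfl : (PySem.List.pyGetD (pvIdsSpec toks t 0) 0 0,
      PySem.List.pyGetD (pvIdsSpec toks t 0) 1 0) = c := by simpa using hg
  have hs := pvIdsSpec_sorted toks t 0
  match hspec : pvIdsSpec toks t 0, hlen with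
  | x :: y :: r, _ =>
    rw [hspec] at hs
    have hg0 : PySem.List.pyGetD (x :: y :: r) 0 0 = x := by simp [PySem.List.pyGetD_ofNat']
    have hg1 : PySem.List.pyGetD (x :: y :: r) 1 0 = y := by simp [PySem.List.pyGetD_ofNat']
    simp only [hg0, hg1]
    have hxmem : x ∈ pvIdsSpec toks t 0 := by rw [hspec]; simp
    have hymem : y ∈ pvIdsSpec toks t 0 := by rw [hspec]; simp
    obtain ⟨k1, hk1, hmem1, rfl⟩ := (pvIdsSpec_mem toks t 0 x).mp hxmem
    obtain ⟨k2, hk2, hmem2, rfl⟩ := (pvIdsSpec_mem toks t 0 y).mp hymem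
    rw [List.pairwise_cons] at hs
    have hxy : ((0 + k1 : Nat) : Int) < ((0 + k2 : Nat) : Int) := hs.1 _ (by simp)
    refine ⟨?_, ?_, ?_⟩
    · simp only [pvHitP, Bool.and_eq_true, bne_iff_ne, Bool.not_eq_true']
      constructor
      · simp only [beq_eq_false_iff_ne, ne_eq]
        omega
      · rw [pvSharesIff]
        refine ⟨t, ?_, ?_⟩
        · simpa [PySem.List.pyGetD_natCast, List.getD] using hmem1
        · simpa [PySem.List.pyGetD_natCast, List.getD] using hmem2
    · rw [PySem.List.mem_pyRange_one]
      constructor <;> [positivity; exact_mod_cast (by omega : 0 + k1 < toks.length)]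
    · rw [PySem.List.mem_pyRange_one]
      constructor <;> [positivity; exact_mod_cast (by omega : 0 + k2 < toks.length)]

lemma pvCands_dom (toks : List (PySem.Set String)) (i j : Int)
    (htn : ∀ s ∈ toks, s.Nodup)
    (hi : i ∈ PySem.List.pyRange 0 toks.length) (hj : j ∈ PySem.List.pyRange 0 toks.length)
    (hp : pvHitP toks i j = true) :
    ∃ c ∈ pvCands toks, pvLeP c (i, j) := by
  rw [PySem.List.mem_pyRange_one] at hi hj
  simp only [pvHitP, Bool.and_eq_true, Bool.not_eq_true', beq_eq_false_iff_ne, ne_eq] at hp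
  obtain ⟨hij, hsh⟩ := hp
  obtain ⟨t, ht1, ht2⟩ := (pvSharesIff toks i j).mp hsh
  obtain ⟨ki, rfl⟩ := Int.eq_ofNat_of_zero_le hi.1
  obtain ⟨kj, rfl⟩ := Int.eq_ofNat_of_zero_le hj.1
  have hki : ki < toks.length := by exact_mod_cast hi.2
  have hkj : kj < toks.length := by exact_mod_cast hj.2
  have hti : (ki : Int) ∈ pvIdsSpec toks t 0 := by
    rw [pvIdsSpec_mem]
    exact ⟨ki, hki, by simpa [PySem.List.pyGetD_natCast, List.getD] using ht1, by simp⟩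
  have htj : (kj : Int) ∈ pvIdsSpec toks t 0 := by
    rw [pvIdsSpec_mem]
    exact ⟨kj, hkj, by simpa [PySem.List.pyGetD_natCast, List.getD] using ht2, by simp⟩
  have hne : (ki : Int) ≠ (kj : Int) := by exact_mod_cast hij
  obtain ⟨hlen, hdom⟩ := pvSortedPairDom (pvIdsSpec toks t 0) _ _
    (pvIdsSpec_sorted toks t 0) hti htj hne
  refine ⟨(PySem.List.pyGetD (pvIdsSpec toks t 0) 0 0,
    PySem.List.pyGetD (pvIdsSpec toks t 0) 1 0), ?_, hdom⟩
  unfold pvCands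
  rw [List.mem_filterMap]
  refine ⟨pvIdsSpec toks t 0, ?_, by rw [if_pos hlen]⟩
  rw [List.mem_map]
  refine ⟨t, ?_, pvIds_eq_spec toks t htn⟩
  rw [PySem.Set.mem_ofList]
  have hti' : (ki : Int) ∈ pvIds toks t := by rw [pvIds_eq_spec toks t htn]; exact hti
  unfold pvIds at hti'
  obtain ⟨p, hpf, _⟩ := List.mem_map.mp hti'
  obtain ⟨hpocc, hpt⟩ := List.mem_filter.mp hpf
  exact List.mem_map.mpr ⟨p, hpocc, by simpa using hpt⟩

-- ---- B-side characterisation ----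
lemma pvFoldMin (vals : List (List Int)) (acc : Option (Int × Int)) :
    vals.foldl (fun best ids =>
      if 2 ≤ ids.length then
        match best with
        | none => some (PySem.List.pyGetD ids 0 0, PySem.List.pyGetD ids 1 0)
        | some b =>
          if (PySem.List.pyGetD ids 0 0, PySem.List.pyGetD ids 1 0).1 < b.1 ||
              ((PySem.List.pyGetD ids 0 0, PySem.List.pyGetD ids 1 0).1 == b.1 &&
                (PySem.List.pyGetD ids 0 0, PySem.List.pyGetD ids 1 0).2 < b.2) then
            some (PySem.List.pyGetD ids 0 0, PySem.List.pyGetD ids 1 0)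
          else some b
      else best) acc =
    (vals.filterMap (fun ids => if 2 ≤ ids.length then
        some (PySem.List.pyGetD ids 0 0, PySem.List.pyGetD ids 1 0) else none)).foldl pvMinStep acc := by
  induction vals generalizing acc with
  | nil => rfl
  | cons ids rest ih =>
    by_cases h2 : 2 ≤ ids.length
    · simp only [List.foldl_cons, List.filterMap_cons, if_pos h2]
      rw [ih]
      rfl
    · simp only [List.foldl_cons, List.filterMap_cons, if_neg h2]
      exact ih acc

lemma pvToksNodup (mentors : List (List String)) : ∀ s ∈ pvToks mentors, s.Nodup := by
  intro s hs
  obtain ⟨m, _, rfl⟩ := List.mem_map.mp hs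
  exact PySem.Set.nodup_ofList _

lemma pvToksLen (mentors : List (List String)) : (pvToks mentors).length = mentors.length := by
  simp [pvToks]

set_option maxHeartbeats 1000000 in
lemma pvBChar (mentors : List (List String)) (courses : List String)
    (hcov : mentors.length ≤ courses.length) :
    supernames_alt mentors courses =
      (pvMin? (pvCands (pvToks mentors))).map
        (fun p => pvFmt (pvToks mentors) courses p.1 p.2) := by
  simp only [supernames_alt]
  rw [show (List.map (fun m => PySem.Set.ofList (List.flatMap (fun name =>
      PySem.List.slice (PySem.Str.split₀ name) none (some (-1))) m)) mentors) = pvToks mentors from rfl]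
  rw [show (List.flatMap (fun p => List.map (fun t => (t, p.1)) p.2)
      (PySem.List.enumerate (pvToks mentors))) = pvOcc (pvToks mentors) from rfl]
  have hnd : (List.foldl (fun d p => d.modify p.1 [] fun l => l ++ [p.2]) PySem.Dict.empty
      (pvOcc (pvToks mentors))).keys.Nodup := by
    exact PySem.Dict.nodup_keys_foldl_modify_key (pvOcc (pvToks mentors)) (fun p => p.1) []
      (fun d p => fun l => l ++ [p.2]) PySem.Dict.empty List.nodup_nil
  have hkeys : (List.foldl (fun d p => d.modify p.1 [] fun l => l ++ [p.2]) PySem.Dict.empty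
      (pvOcc (pvToks mentors))).keys = PySem.Set.ofList ((pvOcc (pvToks mentors)).map (fun p => p.1)) := by
    rw [PySem.Dict.keys_foldl_modify_key (pvOcc (pvToks mentors)) (fun p => p.1) []
      (fun d p => fun l => l ++ [p.2]) PySem.Dict.empty]
    rfl
  have hgetD : ∀ k, (List.foldl (fun d p => d.modify p.1 [] fun l => l ++ [p.2]) PySem.Dict.empty
      (pvOcc (pvToks mentors))).getD k [] = pvIds (pvToks mentors) k := by
    intro k
    have := PySem.Dict.getD_foldl_modify_append (pvOcc (pvToks mentors)) PySem.Dict.empty k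
    simpa [pvIds] using this
  have hvals : (List.foldl (fun d p => d.modify p.1 [] fun l => l ++ [p.2]) PySem.Dict.empty
      (pvOcc (pvToks mentors))).values =
      (PySem.Set.ofList ((pvOcc (pvToks mentors)).map (fun p => p.1))).map
        (fun t => pvIds (pvToks mentors) t) := by
    rw [PySem.Dict.values_eq_map_keys _ hnd [], hkeys]
    exact List.map_congr_left (fun k _ => hgetD k)
  rw [hvals, pvFoldMin]
  rw [show ((PySem.Set.ofList ((pvOcc (pvToks mentors)).map (fun p => p.1))).map
      (fun t => pvIds (pvToks mentors) t)).filterMap (fun ids => if 2 ≤ ids.length then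
        some (PySem.List.pyGetD ids 0 0, PySem.List.pyGetD ids 1 0) else none) =
      pvCands (pvToks mentors) from rfl]
  rw [show (List.foldl pvMinStep none (pvCands (pvToks mentors))) = pvMin? (pvCands (pvToks mentors)) from rfl]
  cases hbest : pvMin? (pvCands (pvToks mentors)) with
  | none => rfl
  | some h =>
    obtain ⟨hmem, -⟩ := pvMin?_some _ _ hbest
    obtain ⟨-, h1r, h2r⟩ := pvCands_mem (pvToks mentors) h (pvToksNodup mentors) hmem
    rw [PySem.List.mem_pyRange_one, pvToksLen] at h1r h2r
    have hb1 : h.1 < (courses.length : Int) := lt_of_lt_of_le h1r.2 (by exact_mod_cast hcov)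
    have hb2 : h.2 < (courses.length : Int) := lt_of_lt_of_le h2r.2 (by exact_mod_cast hcov)
    obtain ⟨id1, id2⟩ := h
    simp only [pvGetSome courses id1 "" h1r.1 hb1, pvGetSome courses id2 "" h2r.1 hb2]
    rfl


-- ---- min of candidates = first hit ----
lemma pvRangeSorted (n : Nat) : (PySem.List.pyRange 0 (n : Int)).Pairwise (· < ·) := by
  rw [PySem.List.pyRange_zero_natCast]
  exact (List.pairwise_lt_range).map _ (fun a b h => by exact_mod_cast h)

lemma pvMinEqHit (toks : List (PySem.Set String)) (htn : ∀ s ∈ toks, s.Nodup) :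
    pvMin? (pvCands toks) =
      pvHit toks (PySem.List.pyRange 0 toks.length) (PySem.List.pyRange 0 toks.length) := by
  cases hhit : pvHit toks (PySem.List.pyRange 0 (toks.length : Int))
      (PySem.List.pyRange 0 (toks.length : Int)) with
  | none =>
    rw [pvMin?_none_iff]
    by_contra hne
    obtain ⟨c, hc⟩ := List.exists_mem_of_ne_nil _ hne
    obtain ⟨hp, h1r, h2r⟩ := pvCands_mem toks c htn hc
    exact absurd hp (by simp [(pvHit_none_iff toks _ _).mp hhit c.1 h1r c.2 h2r])
  | some h =>
    obtain ⟨hp, h1r, h2r, hall⟩ := pvHit_some toks _ _ h (pvRangeSorted toks.length)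
      (pvRangeSorted toks.length) hhit
    obtain ⟨c0, hc0, hle0⟩ := pvCands_dom toks h.1 h.2 htn h1r h2r hp
    cases hmin : pvMin? (pvCands toks) with
    | none =>
      rw [pvMin?_none_iff] at hmin
      rw [hmin] at hc0
      simp at hc0
    | some m =>
      obtain ⟨hmC, hmall⟩ := pvMin?_some _ _ hmin
      obtain ⟨hmp, hm1, hm2⟩ := pvCands_mem toks m htn hmC
      have hhm : pvLeP h (m.1, m.2) := hall m.1 hm1 m.2 hm2 hmp
      have hmh : pvLeP m h := pvLeP_trans (hmall c0 hc0) (by simpa using hle0)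
      rw [pvLeP_antisymm hmh (by simpa using hhm)]


-- ===== VERDICT (by name: the statement is the Claim_ definition above) =====
theorem supernames_spec : Claim_equal_supernames := by
  intro mentors courses _ hpre
  unfold Spec_supernames
  unfold Pre_supernames at hpre
  rw [pvAChar mentors courses hpre, pvBChar mentors courses hpre,
    pvMinEqHit (pvToks mentors) (pvToksNodup mentors), pvToksLen]
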